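-- pv_equiv track=rewrite | github.com/edirent/bicycle-architecture-compiler | plot_emitted_isa_costs.py | count_compiled_instruction_metrics
-- ===== SOURCE A (Python) =====
-- def count_compiled_instruction_metrics(compiled_obj: list) -> tuple[int, int, int]:
--     num_measure = 0
--     num_automorphism = 0
--     total_len = 0
--
--     for operation in compiled_obj:
--         total_len += len(operation)
--         for _, isa in operation:
--             if "Measure" in isa:
--                 num_measure += 1
--             if "Automorphism" in isa:
--                 num_automorphism += 1
--
--     return num_measure, num_automorphism, total_len
-- ===== SOURCE B (Python) =====
-- def count_compiled_instruction_metrics(compiled_obj: list) -> tuple[int, int, int]: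
--     isas = [isa for operation in compiled_obj for _, isa in operation]
--     num_measure = sum("Measure" in isa for isa in isas)
--     num_automorphism = sum("Automorphism" in isa for isa in isas)
--     total_len = sum(len(operation) for operation in compiled_obj)
--     return num_measure, num_automorphism, total_len
-- ===== Notes on version B (the rewrite author's own statement) =====
-- stated objective: idiomatic
-- what changed: Replaces the single interleaved nested loop with a flattened isa list and three independent sum()/generator passes, one per metric.
import Mathlib
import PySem

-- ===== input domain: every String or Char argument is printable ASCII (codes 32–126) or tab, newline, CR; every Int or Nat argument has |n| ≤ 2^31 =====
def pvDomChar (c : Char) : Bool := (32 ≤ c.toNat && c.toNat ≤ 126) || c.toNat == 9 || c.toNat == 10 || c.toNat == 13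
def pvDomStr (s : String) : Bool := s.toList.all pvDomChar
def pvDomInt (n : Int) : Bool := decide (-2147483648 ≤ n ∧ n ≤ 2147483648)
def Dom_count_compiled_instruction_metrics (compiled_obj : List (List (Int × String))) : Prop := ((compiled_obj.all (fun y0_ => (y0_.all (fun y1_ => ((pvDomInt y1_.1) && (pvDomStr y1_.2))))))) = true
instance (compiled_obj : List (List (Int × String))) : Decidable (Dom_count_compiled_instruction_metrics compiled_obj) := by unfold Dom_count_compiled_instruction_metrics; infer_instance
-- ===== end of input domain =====

-- B replaces A's single interleaved nested loop with a flattened isa list and three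
-- independent per-metric passes (idiomatic decomposition; same cost).

-- ===== PORT A =====
-- A: one pass, three counters updated in an interleaved nested loop.
def count_compiled_instruction_metrics (compiled_obj : List (List (Int × String))) : Int × Int × Int :=
  let st := compiled_obj.foldl
    (fun (st : Int × Int × Int) operation =>
      let st := (st.1, st.2.1, st.2.2 + (operation.length : Int))
      operation.foldl
        (fun (st : Int × Int × Int) p =>
          let m := if PySem.Str.isIn "Measure" p.2 then st.1 + 1 else st.1
          let a := if PySem.Str.isIn "Automorphism" p.2 then st.2.1 + 1 else st.2.1
          (m, a, st.2.2)) st)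
    (0, 0, 0)
  (st.1, st.2.1, st.2.2)

-- ===== PORT B =====
-- B: flatten the isa strings once, then three independent sums.
def count_compiled_instruction_metrics_alt (compiled_obj : List (List (Int × String))) : Int × Int × Int :=
  let isas := compiled_obj.flatMap (fun operation => operation.map (fun p => p.2))
  let num_measure : Int := (isas.countP (fun isa => PySem.Str.isIn "Measure" isa) : Int)
  let num_automorphism : Int := (isas.countP (fun isa => PySem.Str.isIn "Automorphism" isa) : Int)
  let total_len : Int := (compiled_obj.map (fun operation => (operation.length : Int))).sum
  (num_measure, num_automorphism, total_len)

-- ===== PRECONDITION & SPEC =====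
def Spec_count_compiled_instruction_metrics (compiled_obj : List (List (Int × String))) (out : Int × Int × Int) : Prop := out = count_compiled_instruction_metrics_alt compiled_obj
instance (compiled_obj : List (List (Int × String))) (out : Int × Int × Int) : Decidable (Spec_count_compiled_instruction_metrics compiled_obj out) := by unfold Spec_count_compiled_instruction_metrics; infer_instance

-- ===== CLAIM (what is proved, stated in full; the proofs are below) =====
def Claim_equal_count_compiled_instruction_metrics : Prop := ∀ (compiled_obj : List (List (Int × String))), Dom_count_compiled_instruction_metrics compiled_obj → Spec_count_compiled_instruction_metrics compiled_obj (count_compiled_instruction_metrics compiled_obj)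

-- ===== LEMMAS AND PROOFS =====

theorem pv_inner (op : List (Int × String)) : ∀ (m a t : Int),
    op.foldl
      (fun (st : Int × Int × Int) p =>
        let m := if PySem.Str.isIn "Measure" p.2 then st.1 + 1 else st.1
        let a := if PySem.Str.isIn "Automorphism" p.2 then st.2.1 + 1 else st.2.1
        (m, a, st.2.2)) (m, a, t)
    = (m + (op.countP (fun p => PySem.Str.isIn "Measure" p.2) : Int),
       a + (op.countP (fun p => PySem.Str.isIn "Automorphism" p.2) : Int), t) := by
  induction op with
  | nil => simp
  | cons p rest ih =>
    intro m a t
    simp only [List.foldl_cons, List.countP_cons, ih]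
    split_ifs <;> simp [Prod.ext_iff] <;> omega

theorem pv_outer2 (co : List (List (Int × String))) : ∀ (m a t : Int),
    co.foldl
      (fun (st : Int × Int × Int) operation =>
        (st.1 + (operation.countP (fun p => PySem.Str.isIn "Measure" p.2) : Int),
         st.2.1 + (operation.countP (fun p => PySem.Str.isIn "Automorphism" p.2) : Int),
         st.2.2 + (operation.length : Int))) (m, a, t)
    = (m + ((co.flatMap (fun operation => operation.map (fun p => p.2))).countP (fun isa => PySem.Str.isIn "Measure" isa) : Int),
       a + ((co.flatMap (fun operation => operation.map (fun p => p.2))).countP (fun isa => PySem.Str.isIn "Automorphism" isa) : Int),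
       t + (co.map (fun operation => (operation.length : Int))).sum) := by
  induction co with
  | nil => simp
  | cons op rest ih =>
    intro m a t
    simp only [List.foldl_cons, ih, List.flatMap_cons, List.countP_append,
      List.countP_map, List.map_cons, List.sum_cons, Prod.ext_iff, Function.comp_def]
    refine ⟨by push_cast; ring, by push_cast; ring, by ring⟩

theorem pv_fun_eq :
    (fun (st : Int × Int × Int) (operation : List (Int × String)) =>
      let st := (st.1, st.2.1, st.2.2 + (operation.length : Int))
      operation.foldl
        (fun (st : Int × Int × Int) p =>
          let m := if PySem.Str.isIn "Measure" p.2 then st.1 + 1 else st.1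
          let a := if PySem.Str.isIn "Automorphism" p.2 then st.2.1 + 1 else st.2.1
          (m, a, st.2.2)) st)
    = (fun (st : Int × Int × Int) operation =>
        (st.1 + (operation.countP (fun p => PySem.Str.isIn "Measure" p.2) : Int),
         st.2.1 + (operation.countP (fun p => PySem.Str.isIn "Automorphism" p.2) : Int),
         st.2.2 + (operation.length : Int))) := by
  funext st op
  exact pv_inner op st.1 st.2.1 (st.2.2 + (op.length : Int))

-- ===== VERDICT (by name: the statement is the Claim_ definition above) =====
theorem count_compiled_instruction_metrics_spec : Claim_equal_count_compiled_instruction_metrics := by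
  intro co _
  show count_compiled_instruction_metrics co = count_compiled_instruction_metrics_alt co
  simp only [count_compiled_instruction_metrics, count_compiled_instruction_metrics_alt,
    pv_fun_eq, pv_outer2]
  simp
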